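-- pv_equiv track=rewrite | github.com/ApexYash11/Troopod-assigment | backend/scraper.py | parse_page_elements
-- ===== SOURCE A (Python) =====
-- def parse_page_elements(page_content: str) -> dict:
--     """
--     Extract original headline, subheadline, and CTA from scraped page content.
--     Uses simple heuristics: first heading, second line, button-like text.
--
--     Args:
--         page_content: Raw scraped page content
--
--     Returns:
--         Dictionary with 'h1', 'subhead', 'cta' keys (fallback to "Not found" if missing)
--     """
--     lines = page_content.split('\n')
--
--     # Extract H1 (first heading-like line)
--     h1 = "Not found"
--     for line in lines:
--         stripped = line.strip()
--         if stripped and len(stripped) > 3 and len(stripped) < 200: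
--             # Skip lines that look like metadata or URLs
--             if not stripped.startswith('http') and not stripped.startswith('#'):
--                 h1 = stripped[:120]  # Cap at 120 chars
--                 break
--
--     # Extract subhead (second prominent line, skip if same as h1)
--     subhead = "Not found"
--     found_count = 0
--     for line in lines:
--         stripped = line.strip()
--         if stripped and len(stripped) > 10 and len(stripped) < 200:
--             if not stripped.startswith('http') and not stripped.startswith('#'):
--                 found_count += 1
--                 if found_count == 2:
--                     subhead = stripped[:150]  # Cap at 150 chars
--                     break
--
--     # Extract CTA (look for button-like text or action words)
--     cta = "Not found"
--     cta_keywords = ['click', 'sign', 'get', 'start', 'join', 'buy', 'learn', 'download', 'submit', 'button', 'cta']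
--     for line in lines:
--         stripped = line.strip()
--         if any(keyword in stripped.lower() for keyword in cta_keywords) and len(stripped) < 100:
--             cta = stripped[:80]  # Cap at 80 chars
--             break
--
--     return {
--         "h1": h1,
--         "subhead": subhead,
--         "cta": cta
--     }
-- ===== SOURCE B (Python) =====
-- def parse_page_elements(page_content: str) -> dict:
--     keywords = ['click', 'sign', 'get', 'start', 'join', 'buy', 'learn', 'download', 'submit', 'button', 'cta']
--
--     def not_link(s):
--         return not s.startswith('http') and not s.startswith('#')
--
--     h1 = sub = cta = None
--     count = 0
--     for line in page_content.split('\n'):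
--         s = line.strip()
--         if h1 is None and s and 3 < len(s) < 200 and not_link(s):
--             h1 = s[:120]
--         if sub is None and s and 10 < len(s) < 200 and not_link(s):
--             count += 1
--             if count == 2:
--                 sub = s[:150]
--         if cta is None and any(k in s.lower() for k in keywords) and len(s) < 100:
--             cta = s[:80]
--         if h1 is not None and sub is not None and cta is not None:
--             break
--     return {
--         "h1": h1 if h1 is not None else "Not found",
--         "subhead": sub if sub is not None else "Not found",
--         "cta": cta if cta is not None else "Not found",
--     }
-- ===== Notes on version B (the rewrite author's own statement) =====
-- stated objective: alternative
-- what changed: Replaces A's three separate scans over the line list (one per field) by a single loop that strips each line once, maintains h1/subhead/cta and the subhead counter simultaneously, and breaks early once all three are found.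
import Mathlib
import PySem

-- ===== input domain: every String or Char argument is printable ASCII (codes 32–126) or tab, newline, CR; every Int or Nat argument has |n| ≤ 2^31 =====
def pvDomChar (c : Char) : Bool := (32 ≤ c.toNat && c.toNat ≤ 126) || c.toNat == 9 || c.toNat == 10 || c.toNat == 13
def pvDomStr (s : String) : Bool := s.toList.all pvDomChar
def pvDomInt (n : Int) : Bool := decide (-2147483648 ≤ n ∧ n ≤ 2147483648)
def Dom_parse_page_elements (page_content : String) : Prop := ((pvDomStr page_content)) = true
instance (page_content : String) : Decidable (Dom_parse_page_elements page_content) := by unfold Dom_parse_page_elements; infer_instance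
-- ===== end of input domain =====

-- B rewrites A's three separate scans of the lines as one loop maintaining all three
-- results at once, with an early break once all are found (objective: alternative single-pass decomposition).

-- shared per-line predicates (the same condition expressions appear verbatim in both Pythons)
def pvNotLink (s : String) : Bool :=
  !(PySem.Str.startswith s "http") && !(PySem.Str.startswith s "#")

def pvH1Filter (s : String) : Bool :=
  (s != "") && decide (3 < PySem.Str.len s) && decide (PySem.Str.len s < 200)

def pvSubFilter (s : String) : Bool :=
  (s != "") && decide (10 < PySem.Str.len s) && decide (PySem.Str.len s < 200)

def pvKeywords : List String :=
  ["click", "sign", "get", "start", "join", "buy", "learn", "download", "submit", "button", "cta"]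

def pvCtaCond (s : String) : Bool :=
  (pvKeywords.any (fun k => PySem.Str.isIn k (PySem.Str.lower s))) && decide (PySem.Str.len s < 100)

-- ===== PORT A =====
def pvFindH1 : List String → String
  | [] => "Not found"
  | l :: rest =>
    let s := PySem.Str.strip l
    if pvH1Filter s then
      if pvNotLink s then PySem.Str.slice s none (some 120) else pvFindH1 rest
    else pvFindH1 rest

def pvFindSub : List String → Nat → String
  | [], _ => "Not found"
  | l :: rest, cnt =>
    let s := PySem.Str.strip l
    if pvSubFilter s then
      if pvNotLink s then
        if cnt + 1 == 2 then PySem.Str.slice s none (some 150) else pvFindSub rest (cnt + 1)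
      else pvFindSub rest cnt
    else pvFindSub rest cnt

def pvFindCta : List String → String
  | [] => "Not found"
  | l :: rest =>
    let s := PySem.Str.strip l
    if pvCtaCond s then PySem.Str.slice s none (some 80) else pvFindCta rest

def parse_page_elements (page_content : String) : List (String × String) :=
  let lines := (PySem.Str.split? page_content "\n").getD []
  [("h1", pvFindH1 lines), ("subhead", pvFindSub lines 0), ("cta", pvFindCta lines)]

-- ===== PORT B =====
def pvLoopB : List String → Option String → Nat → Option String → Option String → List (String × String)
  | [], h1?, _, sub?, cta? =>
    [("h1", h1?.getD "Not found"), ("subhead", sub?.getD "Not found"), ("cta", cta?.getD "Not found")]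
  | l :: rest, h1?, cnt, sub?, cta? =>
    let s := PySem.Str.strip l
    let h1' := if h1?.isNone && pvH1Filter s && pvNotLink s then some (PySem.Str.slice s none (some 120)) else h1?
    let cnt' := if sub?.isNone && pvSubFilter s && pvNotLink s then cnt + 1 else cnt
    let sub' := if sub?.isNone && pvSubFilter s && pvNotLink s && (cnt' == 2) then some (PySem.Str.slice s none (some 150)) else sub?
    let cta' := if cta?.isNone && pvCtaCond s then some (PySem.Str.slice s none (some 80)) else cta?
    if h1'.isSome && sub'.isSome && cta'.isSome then
      [("h1", h1'.getD "Not found"), ("subhead", sub'.getD "Not found"), ("cta", cta'.getD "Not found")]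
    else
      pvLoopB rest h1' cnt' sub' cta'

def parse_page_elements_alt (page_content : String) : List (String × String) :=
  pvLoopB ((PySem.Str.split? page_content "\n").getD []) none 0 none none

-- ===== PRECONDITION & SPEC =====
def Spec_parse_page_elements (page_content : String) (out : List (String × String)) : Prop := out = parse_page_elements_alt page_content
instance (page_content : String) (out : List (String × String)) : Decidable (Spec_parse_page_elements page_content out) := by unfold Spec_parse_page_elements; infer_instance

-- ===== CLAIM (what is proved, stated in full; the proofs are below) =====
def Claim_equal_parse_page_elements : Prop := ∀ (page_content : String), Dom_parse_page_elements page_content → Spec_parse_page_elements page_content (parse_page_elements page_content)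

-- ===== LEMMAS AND PROOFS =====
set_option maxHeartbeats 1000000 in
-- B's single loop, from any intermediate state, equals A's three scans filled into the
-- not-yet-found slots (the early break is sound because then all slots are `some`).
lemma pvLoopB_eq (lines : List String) :
    ∀ (h1? : Option String) (cnt : Nat) (sub? : Option String) (cta? : Option String),
      pvLoopB lines h1? cnt sub? cta? =
        [("h1", h1?.getD (pvFindH1 lines)),
         ("subhead", sub?.getD (pvFindSub lines cnt)),
         ("cta", cta?.getD (pvFindCta lines))] := by
  induction lines with
  | nil =>
    intro h1? cnt sub? cta?
    simp [pvLoopB, pvFindH1, pvFindSub, pvFindCta]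
  | cons l rest ih =>
    intro h1? cnt sub? cta?
    cases h1? <;> cases sub? <;> cases cta? <;>
      by_cases hH : pvH1Filter (PySem.Str.strip l) <;>
      by_cases hN : pvNotLink (PySem.Str.strip l) <;>
      by_cases hS : pvSubFilter (PySem.Str.strip l) <;>
      by_cases hC : pvCtaCond (PySem.Str.strip l) <;>
      by_cases h2 : (cnt + 1 == 2) = true <;>
      simp [pvLoopB, pvFindH1, pvFindSub, pvFindCta, hH, hN, hS, hC, h2, ih]

-- ===== VERDICT (by name: the statement is the Claim_ definition above) =====
theorem parse_page_elements_spec : Claim_equal_parse_page_elements := by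
  intro pc _
  unfold Spec_parse_page_elements parse_page_elements parse_page_elements_alt
  simp [pvLoopB_eq]
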